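-- pv_equiv track=rewrite | github.com/capstone-project-team06/AI | app/services/outfit_merge.py | merge_outfit_jsons
-- ===== SOURCE A (Python) =====
-- from typing import Dict, List, Any
-- import collections
--
-- def merge_outfit_jsons(outfits: List[Dict[str, Any]]) -> Dict[str, Any]:
--     """
--     여러 outfit JSON → 하나의 unified JSON으로 병합.
--     룰:
--     - 동일 category 항목은 가장 많이 등장한 속성으로 선택
--     - color/material/fit은 frequency 기반 majority vote
--     """
--
--     category_map = collections.defaultdict(list)
--
--     for outfit in outfits:
--         for g in outfit.get("garments", []):
--             category_map[g["category"]].append(g)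
--
--     merged = {"garments": []}
--
--     for category, items in category_map.items():
--         # 가장 많이 등장한 속성 선택
--         counter_name = collections.Counter([it.get("name") for it in items if it.get("name")])
--         counter_color = collections.Counter([it.get("color") for it in items if it.get("color")])
--         counter_material = collections.Counter([it.get("material") for it in items if it.get("material")])
--         counter_fit = collections.Counter([it.get("fit") for it in items if it.get("fit")])
--
--         merged["garments"].append({
--             "category": category,
--             "name": counter_name.most_common(1)[0][0] if counter_name else None,
--             "color": counter_color.most_common(1)[0][0] if counter_color else None,
--             "material": counter_material.most_common(1)[0][0] if counter_material else None,
--             "fit": counter_fit.most_common(1)[0][0] if counter_fit else None,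
--         })
--
--     return merged
-- ===== SOURCE B (Python) =====
-- def merge_outfit_jsons(outfits):
--     # Single pass: per-category value->count tables for the four attributes
--     # (no per-category item lists, no Counter); winner = first value with
--     # strictly greatest count, scanning in insertion order.
--     ATTRS = ("name", "color", "material", "fit")
--     stats = {}  # category -> (names, colors, materials, fits) count dicts
--     for outfit in outfits:
--         for g in outfit.get("garments", []):
--             per = stats.setdefault(g["category"], ({}, {}, {}, {}))
--             for d, a in zip(per, ATTRS):
--                 v = g.get(a)
--                 if v:
--                     d[v] = d.get(v, 0) + 1
--     garments = []
--     for category, per in stats.items():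
--         row = {"category": category}
--         for d, a in zip(per, ATTRS):
--             best, bestc = None, 0
--             for value, cnt in d.items():
--                 if best is None or cnt > bestc:
--                     best, bestc = value, cnt
--             row[a] = best
--         garments.append(row)
--     return {"garments": garments}
-- ===== Notes on version B (the rewrite author's own statement) =====
-- stated objective: alternative
-- what changed: Instead of grouping garments into per-category item lists and running four Counter.most_common passes per category, B makes a single pass that maintains per-category value->count tables for the four attributes and then picks each winner with an explicit first-seen strict-max scan, never materialising item lists or Counters.
import Mathlib
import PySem

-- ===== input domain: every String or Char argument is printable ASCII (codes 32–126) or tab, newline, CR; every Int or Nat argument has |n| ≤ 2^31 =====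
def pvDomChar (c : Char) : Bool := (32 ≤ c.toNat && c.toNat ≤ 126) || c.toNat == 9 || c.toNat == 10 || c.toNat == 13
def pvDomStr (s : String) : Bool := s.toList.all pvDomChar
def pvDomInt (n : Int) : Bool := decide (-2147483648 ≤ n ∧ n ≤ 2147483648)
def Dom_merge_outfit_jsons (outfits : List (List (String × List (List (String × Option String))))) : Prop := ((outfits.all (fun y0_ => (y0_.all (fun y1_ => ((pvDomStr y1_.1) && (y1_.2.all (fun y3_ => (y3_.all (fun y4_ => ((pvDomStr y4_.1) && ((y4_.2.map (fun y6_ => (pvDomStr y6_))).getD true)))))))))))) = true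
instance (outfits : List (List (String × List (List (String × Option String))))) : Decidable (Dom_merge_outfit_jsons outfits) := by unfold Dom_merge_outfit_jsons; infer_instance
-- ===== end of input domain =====

-- B replaces A's group-into-lists-then-Counter decomposition by a single pass that
-- maintains per-category value→count tables and an explicit first-seen strict-max scan
-- (objective: alternative decomposition, same asymptotic cost).


-- ===== PORT A =====
-- g.get(k) on a garment dict (assoc list, first match); missing key → None
def pvGet (g : List (String × Option String)) (k : String) : Option String :=
  ((g.find? (fun p => p.1 == k)).map (·.2)).getD none

-- outfit.get("garments", [])
def pvGarments (o : List (String × List (List (String × Option String)))) :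
    List (List (String × Option String)) :=
  ((o.find? (fun p => p.1 == "garments")).map (·.2)).getD []

-- the value kept by the comprehension filter 'if it.get(attr)' (truthy: non-None, non-empty)
def pvTruthy (v : Option String) : Option String :=
  match v with
  | some s => if s = "" then none else some s
  | none => none

-- Counter.most_common(1)[0][0] if counter else None — exact: the first key (insertion
-- order) with maximal count, which is Counter.most_common's stable tie-break.
def pvMostCommon1 (c : PySem.Dict String Int) : Option String :=
  (c.items.foldl
    (fun acc p =>
      match acc with
      | none => some p
      | some q => if q.2 < p.2 then some p else some q) none).map (·.1)

def merge_outfit_jsons (outfits : List (List (String × List (List (String × Option String))))) : List (String × List (List (String × Option String))) :=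
  let category_map :=
    outfits.foldl
      (fun d outfit =>
        (pvGarments outfit).foldl
          (fun d g => d.modify (pvGet g "category") [] (fun l => l ++ [g])) d)
      PySem.Dict.empty
  let garments :=
    category_map.items.map (fun p =>
      let items := p.2
      let counter_name := PySem.Dict.counter (items.filterMap (fun it => pvTruthy (pvGet it "name")))
      let counter_color := PySem.Dict.counter (items.filterMap (fun it => pvTruthy (pvGet it "color")))
      let counter_material := PySem.Dict.counter (items.filterMap (fun it => pvTruthy (pvGet it "material")))
      let counter_fit := PySem.Dict.counter (items.filterMap (fun it => pvTruthy (pvGet it "fit")))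
      [("category", p.1), ("name", pvMostCommon1 counter_name),
       ("color", pvMostCommon1 counter_color),
       ("material", pvMostCommon1 counter_material),
       ("fit", pvMostCommon1 counter_fit)])
  [("garments", garments)]

-- ===== PORT B =====
-- 'v = g.get(a); if v: d[v] = d.get(v, 0) + 1'
def bBump (d : PySem.Dict String Int) (v : Option String) : PySem.Dict String Int :=
  match v with
  | some s => if s = "" then d else d.modify s 0 (· + 1)
  | none => d

abbrev BStats := PySem.Dict String Int × PySem.Dict String Int × PySem.Dict String Int × PySem.Dict String Int

def bEmpty4 : BStats := (PySem.Dict.empty, PySem.Dict.empty, PySem.Dict.empty, PySem.Dict.empty)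

-- the inner 'for d, a in zip(per, ATTRS)' update of one garment
def bStep (g : List (String × Option String)) (q : BStats) : BStats :=
  (bBump q.1 (pvGet g "name"), bBump q.2.1 (pvGet g "color"),
   bBump q.2.2.1 (pvGet g "material"), bBump q.2.2.2 (pvGet g "fit"))

-- 'best, bestc = None, 0; for value, cnt in d.items(): if best is None or cnt > bestc: …'
def bWinner (c : PySem.Dict String Int) : Option String :=
  (c.items.foldl
    (fun (b : Option String × Int) p =>
      if b.1 = none ∨ b.2 < p.2 then (some p.1, p.2) else b) (none, 0)).1

def merge_outfit_jsons_alt (outfits : List (List (String × List (List (String × Option String))))) : List (String × List (List (String × Option String))) :=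
  let stats :=
    outfits.foldl
      (fun s outfit =>
        (pvGarments outfit).foldl
          (fun s g => s.modify (pvGet g "category") bEmpty4 (bStep g)) s)
      PySem.Dict.empty
  let garments :=
    stats.items.map (fun p =>
      [("category", p.1), ("name", bWinner p.2.1), ("color", bWinner p.2.2.1),
       ("material", bWinner p.2.2.2.1), ("fit", bWinner p.2.2.2.2)])
  [("garments", garments)]

-- ===== PRECONDITION & SPEC =====
-- Pre_ excludes exactly the inputs where Python A raises KeyError: a garment in some
-- outfit's "garments" list lacking the "category" key (B raises there too).
def Pre_merge_outfit_jsons (outfits : List (List (String × List (List (String × Option String))))) : Prop :=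
  (outfits.all (fun o => (pvGarments o).all (fun g => g.any (fun p => p.1 == "category")))) = true
instance (outfits : List (List (String × List (List (String × Option String))))) : Decidable (Pre_merge_outfit_jsons outfits) := by unfold Pre_merge_outfit_jsons; infer_instance

def pvWitness_merge_outfit_jsons : (List (List (String × List (List (String × Option String))))) :=
  [[("garments", [[("category", some "top"), ("name", some "tee"), ("color", some "red")],
                  [("category", some "top"), ("color", some "blue")]])],
   [("garments", [[("category", some "top"), ("color", some "blue")]])]]

def Spec_merge_outfit_jsons (outfits : List (List (String × List (List (String × Option String))))) (out : List (String × List (List (String × Option String)))) : Prop := out = merge_outfit_jsons_alt outfits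
instance (outfits : List (List (String × List (List (String × Option String))))) (out : List (String × List (List (String × Option String)))) : Decidable (Spec_merge_outfit_jsons outfits out) := by unfold Spec_merge_outfit_jsons; infer_instance

-- ===== CLAIM (what is proved, stated in full; the proofs are below) =====
def Claim_equal_merge_outfit_jsons : Prop := ∀ (outfits : List (List (String × List (List (String × Option String))))), Dom_merge_outfit_jsons outfits → Pre_merge_outfit_jsons outfits → Spec_merge_outfit_jsons outfits (merge_outfit_jsons outfits)

-- ===== LEMMAS AND PROOFS =====
theorem pv_foldl_nested {α β δ : Type} (L : List α) (G : α → List β) (f : δ → β → δ) (init : δ) :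
    L.foldl (fun d o => (G o).foldl f d) init = (L.flatMap G).foldl f init := by
  induction L generalizing init with
  | nil => rfl
  | cons o L ih => simp [List.flatMap_cons, List.foldl_append, ih]

theorem pv_getD_foldl_modify_key {κ β ν : Type} [BEq κ] [LawfulBEq κ] [DecidableEq κ]
    (l : List β) (key : β → κ) (d0 : ν) (f : β → ν → ν) (d : PySem.Dict κ ν) (c : κ) :
    (l.foldl (fun d b => d.modify (key b) d0 (f b)) d).getD c d0
      = (l.filter (fun b => key b == c)).foldl (fun v b => f b v) (d.getD c d0) := by
  induction l generalizing d with
  | nil => rfl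
  | cons b l ih =>
    simp only [List.foldl_cons, List.filter_cons]
    rw [ih, PySem.Dict.getD_modify]
    by_cases h : key b = c
    · simp [h]
    · have h' : ¬ (c = key b) := fun e => h e.symm
      simp [h, h']

theorem pv_foldl_append_singleton {α : Type} (l : List α) (a : List α) :
    l.foldl (fun acc x => acc ++ [x]) a = a ++ l := by
  induction l generalizing a with
  | nil => simp
  | cons x l ih => simp [ih]

theorem pv_foldl_bStep (l : List (List (String × Option String))) (q : BStats) :
    l.foldl (fun q g => bStep g q) q
      = (l.foldl (fun d g => bBump d (pvGet g "name")) q.1,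
         l.foldl (fun d g => bBump d (pvGet g "color")) q.2.1,
         l.foldl (fun d g => bBump d (pvGet g "material")) q.2.2.1,
         l.foldl (fun d g => bBump d (pvGet g "fit")) q.2.2.2) := by
  induction l generalizing q with
  | nil => rfl
  | cons g l ih =>
    simp only [List.foldl_cons]
    rw [ih]
    simp [bStep]

theorem pv_bBump_eq (d : PySem.Dict String Int) (v : Option String) :
    bBump d v = match pvTruthy v with
      | some s => d.modify s 0 (· + 1)
      | none => d := by
  cases v with
  | none => rfl
  | some s =>
    by_cases h : s = "" <;> simp [bBump, pvTruthy, h]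

theorem pv_foldl_bBump (attr : String) (l : List (List (String × Option String)))
    (d : PySem.Dict String Int) :
    l.foldl (fun d g => bBump d (pvGet g attr)) d
      = (l.filterMap (fun it => pvTruthy (pvGet it attr))).foldl
          (fun d x => d.modify x 0 (· + 1)) d := by
  induction l generalizing d with
  | nil => rfl
  | cons g l ih =>
    simp only [List.foldl_cons, List.filterMap_cons]
    rw [pv_bBump_eq d (pvGet g attr)]
    cases h : pvTruthy (pvGet g attr) with
    | none => exact ih d
    | some s => exact ih (d.modify s 0 (· + 1))

theorem pv_winner_aux (l : List (String × Int)) (v : String) (n : Int) :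
    ∃ v' n',
      l.foldl (fun acc p => match acc with
        | none => some p
        | some q => if q.2 < p.2 then some p else some q) (some (v, n)) = some (v', n')
      ∧ l.foldl (fun (b : Option String × Int) p =>
          if b.1 = none ∨ b.2 < p.2 then (some p.1, p.2) else b) (some v, n) = (some v', n') := by
  induction l generalizing v n with
  | nil => exact ⟨v, n, rfl, rfl⟩
  | cons p l ih =>
    simp only [List.foldl_cons]
    by_cases h : n < p.2
    · simpa [h] using ih p.1 p.2
    · simpa [h] using ih v n

theorem pv_winner_eq (c : PySem.Dict String Int) : pvMostCommon1 c = bWinner c := by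
  unfold pvMostCommon1 bWinner
  cases c.items with
  | nil => rfl
  | cons p rest =>
    simp only [List.foldl_cons]
    obtain ⟨v', n', hA, hB⟩ := pv_winner_aux rest p.1 p.2
    simp [hA, hB]

-- abbreviations used only in the proof below
def pvCat (g : List (String × Option String)) : Option String := pvGet g "category"

theorem pv_row_eq (gs : List (List (String × Option String))) (c : Option String) :
    (let items := (gs.filter (fun g => pvCat g == c))
     [((("category" : String)), c),
      ("name", pvMostCommon1 (PySem.Dict.counter (items.filterMap (fun it => pvTruthy (pvGet it "name"))))),
      ("color", pvMostCommon1 (PySem.Dict.counter (items.filterMap (fun it => pvTruthy (pvGet it "color"))))),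
      ("material", pvMostCommon1 (PySem.Dict.counter (items.filterMap (fun it => pvTruthy (pvGet it "material"))))),
      ("fit", pvMostCommon1 (PySem.Dict.counter (items.filterMap (fun it => pvTruthy (pvGet it "fit")))))])
    = (let q := (gs.filter (fun g => pvCat g == c)).foldl (fun q g => bStep g q) bEmpty4
       [((("category" : String)), c), ("name", bWinner q.1), ("color", bWinner q.2.1),
        ("material", bWinner q.2.2.1), ("fit", bWinner q.2.2.2)]) := by
  simp only [pv_foldl_bStep, bEmpty4, pv_foldl_bBump, ← PySem.Dict.counter_eq_foldl, pv_winner_eq]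

theorem merge_eq (outfits : List (List (String × List (List (String × Option String))))) :
    merge_outfit_jsons outfits = merge_outfit_jsons_alt outfits := by
  simp only [merge_outfit_jsons, merge_outfit_jsons_alt]
  rw [pv_foldl_nested, pv_foldl_nested]
  set gs := outfits.flatMap pvGarments with hgs
  have hndA : (gs.foldl (fun d g => d.modify (pvGet g "category") [] (fun l => l ++ [g])) PySem.Dict.empty).keys.Nodup :=
    PySem.Dict.nodup_keys_foldl_modify_key gs (fun g => pvGet g "category") [] (fun _ g => (fun l => l ++ [g])) PySem.Dict.empty (by simp)
  have hndB : (gs.foldl (fun s g => s.modify (pvGet g "category") bEmpty4 (bStep g)) PySem.Dict.empty).keys.Nodup :=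
    PySem.Dict.nodup_keys_foldl_modify_key gs (fun g => pvGet g "category") bEmpty4 (fun _ g => bStep g) PySem.Dict.empty (by simp)
  have hkA := PySem.Dict.keys_foldl_modify_key (l := gs) (key := fun g => pvGet g "category") (d0 := ([] : List (List (String × Option String)))) (f := fun _ g => (fun l => l ++ [g])) (d := PySem.Dict.empty)
  have hkB := PySem.Dict.keys_foldl_modify_key (l := gs) (key := fun g => pvGet g "category") (d0 := bEmpty4) (f := fun _ g => bStep g) (d := PySem.Dict.empty)
  rw [PySem.Dict.items_eq_map_keys _ hndA [], PySem.Dict.items_eq_map_keys _ hndB bEmpty4]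
  rw [hkA, hkB]
  simp only [List.map_map]
  refine congrArg (fun l => [(("garments" : String), l)]) ?_
  refine List.map_congr_left ?_
  intro c _
  simp only [Function.comp]
  rw [pv_getD_foldl_modify_key gs (fun g => pvGet g "category") [] (fun g => (fun l => l ++ [g])) PySem.Dict.empty c,
      pv_getD_foldl_modify_key gs (fun g => pvGet g "category") bEmpty4 (fun g => bStep g) PySem.Dict.empty c]
  simp only [PySem.Dict.getD_empty, pv_foldl_append_singleton, List.nil_append]
  have := pv_row_eq gs c
  simp only [pvCat] at this
  simpa using this

-- ===== VERDICT (by name: the statement is the Claim_ definition above) =====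
theorem merge_outfit_jsons_spec : Claim_equal_merge_outfit_jsons := by
  intro outfits _ _
  unfold Spec_merge_outfit_jsons
  exact merge_eq outfits
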